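-- pv_equiv track=rewrite | github.com/amha-kindu/competitive-programming | 2373-largest-local-values-in-a-matrix/2373-largest-local-values-in-a-matrix.py | largestLocal
-- ===== SOURCE A (Python) =====
-- from typing import List
--
-- def largestLocal(grid: List[List[int]]) -> List[List[int]]:
--
--     get_max = lambda i, j: max(max(grid[i][j:j+3]), max(max(grid[i+1][j:j+3]), max(grid[i+2][j:j+3])))
--
--     answer = []
--
--     for r in range(len(grid)-2):
--         ans_row = []
--         for c in range(len(grid[0])-2):
--             ans_row.append(get_max(r, c))
--         answer.append(ans_row)
--
--     return answer
-- ===== SOURCE B (Python) =====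
-- from typing import List
--
-- def largestLocal(grid: List[List[int]]) -> List[List[int]]:
--     if len(grid) < 3:
--         return []
--     w = len(grid[0])
--     # horizontal pass: max of each length-3 window in every row
--     H = [[max(row[c:c+3]) for c in range(w - 2)] for row in grid]
--     # vertical pass: combine three horizontal maxima per window
--     return [[max(H[r][c], H[r + 1][c], H[r + 2][c]) for c in range(w - 2)]
--             for r in range(len(grid) - 2)]
-- ===== Notes on version B (the rewrite author's own statement) =====
-- stated objective: alternative
-- what changed: Replaced the per-cell 3x3 block scan with a separable two-pass max-pool: one pass builds a table H of horizontal 3-window maxima per row, a second pass combines three stacked H entries per output cell, reusing each horizontal maximum across the three vertical windows that contain it.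
import Mathlib
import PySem

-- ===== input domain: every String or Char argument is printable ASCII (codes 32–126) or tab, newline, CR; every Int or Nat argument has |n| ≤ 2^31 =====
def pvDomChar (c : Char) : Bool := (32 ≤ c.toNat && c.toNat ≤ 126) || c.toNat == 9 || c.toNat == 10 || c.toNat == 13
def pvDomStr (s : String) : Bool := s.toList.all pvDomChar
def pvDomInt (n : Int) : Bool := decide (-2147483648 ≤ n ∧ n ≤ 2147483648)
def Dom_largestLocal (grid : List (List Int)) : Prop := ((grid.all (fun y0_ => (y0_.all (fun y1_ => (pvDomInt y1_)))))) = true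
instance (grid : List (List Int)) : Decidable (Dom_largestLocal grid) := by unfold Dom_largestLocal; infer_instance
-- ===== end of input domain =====

-- B replaces A's per-cell 3x3 block scan by a separable two-pass max-pool (horizontal-maxima table, then vertical combine); objective: alternative decomposition, same cost.


-- ===== PORT A =====
-- Python's max(xs) on a list of ints; default 0 is never reached under Pre_ (slices nonempty there)
def pyMaxD (xs : List Int) : Int := (PySem.List.max? xs (fun y => y)).getD 0

def largestLocal (grid : List (List Int)) : List (List Int) :=
  let getMax : Int → Int → Int := fun i j =>
    max (pyMaxD (PySem.List.slice (PySem.List.pyGetD grid i []) (some j) (some (j+3))))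
      (max (pyMaxD (PySem.List.slice (PySem.List.pyGetD grid (i+1) []) (some j) (some (j+3))))
        (pyMaxD (PySem.List.slice (PySem.List.pyGetD grid (i+2) []) (some j) (some (j+3)))))
  (PySem.List.pyRange 0 ((grid.length : Int) - 2) 1).map (fun r =>
    (PySem.List.pyRange 0 (((grid.headD []).length : Int) - 2) 1).map (fun c => getMax r c))

-- ===== PORT B =====
def largestLocal_alt (grid : List (List Int)) : List (List Int) :=
  if grid.length < 3 then []
  else
    let w : Int := ((grid.headD []).length : Int)
    let H : List (List Int) := grid.map (fun row =>
      (PySem.List.pyRange 0 (w - 2) 1).map (fun c =>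
        pyMaxD (PySem.List.slice row (some c) (some (c+3)))))
    let getH : Int → Int → Int := fun i c =>
      PySem.List.pyGetD (PySem.List.pyGetD H i []) c 0
    (PySem.List.pyRange 0 ((grid.length : Int) - 2) 1).map (fun r =>
      (PySem.List.pyRange 0 (w - 2) 1).map (fun c =>
        max (getH r c) (max (getH (r+1) c) (getH (r+2) c))))

-- ===== PRECONDITION & SPEC =====
-- Pre_ excludes exactly the inputs where Python A raises ValueError (max of an empty slice):
-- with ≥ 3 rows, some row shorter than len(grid[0]) - 2 makes a window slice empty.
def Pre_largestLocal (grid : List (List Int)) : Prop :=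
  3 ≤ grid.length → ∀ row ∈ grid, (grid.headD []).length ≤ row.length + 2
instance (grid : List (List Int)) : Decidable (Pre_largestLocal grid) := by
  unfold Pre_largestLocal; infer_instance

def pvWitness_largestLocal : List (List Int) := [[1, 2, 3], [4, 5, 6], [7, 8, 9]]

def Spec_largestLocal (grid : List (List Int)) (out : List (List Int)) : Prop := out = largestLocal_alt grid
instance (grid : List (List Int)) (out : List (List Int)) : Decidable (Spec_largestLocal grid out) := by unfold Spec_largestLocal; infer_instance

-- ===== CLAIM (what is proved, stated in full; the proofs are below) =====
def Claim_equal_largestLocal : Prop := ∀ (grid : List (List Int)), Dom_largestLocal grid → Pre_largestLocal grid → Spec_largestLocal grid (largestLocal grid)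

-- ===== LEMMAS AND PROOFS =====

-- B's lookup into the horizontal-maxima table H equals A's direct slice-max, for in-range indices
lemma getH_eq (grid : List (List Int)) (i c : Int)
    (hi0 : 0 ≤ i) (hin : i < (grid.length : Int))
    (hc0 : 0 ≤ c) (hcw : c < ((grid.headD []).length : Int) - 2) :
    PySem.List.pyGetD
      (PySem.List.pyGetD
        (grid.map (fun row =>
          (PySem.List.pyRange 0 (((grid.headD []).length : Int) - 2) 1).map (fun c =>
            pyMaxD (PySem.List.slice row (some c) (some (c+3)))))) i []) c 0
    = pyMaxD (PySem.List.slice (PySem.List.pyGetD grid i []) (some c) (some (c+3))) := by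
  rw [PySem.List.pyGetD_eq_getElem _ _ hi0 (by simpa using hin),
      PySem.List.pyGetD_eq_getElem _ _ hi0 (by simpa using hin),
      List.getElem_map]
  exact PySem.List.pyGetD_map_pyRange_of_nonneg _ _ _ _ hc0 hcw

theorem largestLocal_spec : Claim_equal_largestLocal := by
  intro grid _ _
  unfold Spec_largestLocal largestLocal largestLocal_alt
  by_cases h3 : grid.length < 3
  · simp only [if_pos h3]
    rw [show PySem.List.pyRange 0 ((grid.length : Int) - 2) 1 = [] from
          PySem.List.pyRange_one_eq_nil (by omega), List.map_nil]
  · simp only [if_neg h3]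
    apply List.map_congr_left
    intro r hr
    rw [PySem.List.mem_pyRange_one] at hr
    apply List.map_congr_left
    intro c hc
    rw [PySem.List.mem_pyRange_one] at hc
    have hn : ¬ ((grid.length : Int) < 3) := by exact_mod_cast h3
    rw [getH_eq grid r c (by omega) (by omega) hc.1 hc.2,
        getH_eq grid (r+1) c (by omega) (by omega) hc.1 hc.2,
        getH_eq grid (r+2) c (by omega) (by omega) hc.1 hc.2]
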